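-- pv_equiv track=rewrite | github.com/smatsuodev/hitNbrow-42 | original/util/util.py | get_high_low_info
-- ===== SOURCE A (Python) =====
-- def get_high_low_info(secret: str) -> tuple[int, int]:
--     """
--     与えられた数字文字列のHIGH(5-9)とLOW(0-4)の個数を返す。
--     """
--     high_count = 0
--     low_count = 0
--     for digit_char in secret:
--         try:
--             digit = int(digit_char)
--             if 0 <= digit <= 4:
--                 low_count += 1
--             elif 5 <= digit <= 9:
--                 high_count += 1
--             # else: 文字が0-9でない場合は無視するかエラー処理
--         except ValueError:
--             # 数字でない文字が含まれている場合の処理（例：エラーを発生させるか無視）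
--             pass # ここでは無視
--     return high_count, low_count
-- ===== SOURCE B (Python) =====
-- def get_high_low_info(secret: str) -> tuple[int, int]:
--     # Two-pass: collect parsed digit values first, then derive both counts
--     # from a single low-count (every successfully parsed single char is 0-9).
--     values = []
--     for digit_char in secret:
--         try:
--             values.append(int(digit_char))
--         except ValueError:
--             pass
--     low_count = sum(1 for d in values if d <= 4)
--     return len(values) - low_count, low_count
-- ===== Notes on version B (the rewrite author's own statement) =====
-- stated objective: alternative
-- what changed: B first collects all successfully parsed digit values into one list, then computes low_count by a single predicate count and derives high_count as len(values) - low_count, instead of A's single loop maintaining two counters with a three-way branch.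
import Mathlib
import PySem

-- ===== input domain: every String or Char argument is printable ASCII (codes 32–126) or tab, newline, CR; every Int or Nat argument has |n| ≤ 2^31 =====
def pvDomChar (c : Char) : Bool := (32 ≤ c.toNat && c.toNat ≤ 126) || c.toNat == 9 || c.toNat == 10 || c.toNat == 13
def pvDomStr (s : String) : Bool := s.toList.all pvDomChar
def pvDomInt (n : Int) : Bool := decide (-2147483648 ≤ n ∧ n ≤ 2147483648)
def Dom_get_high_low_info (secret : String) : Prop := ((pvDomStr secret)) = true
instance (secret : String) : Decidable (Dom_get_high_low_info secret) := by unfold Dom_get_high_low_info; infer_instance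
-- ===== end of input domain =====

-- B collects the parsed digit values first, then counts lows once and derives highs;
-- equivalence is exact on the whole ASCII domain (objective: alternative decomposition).

-- ===== PORT A =====
-- one loop over the characters, maintaining both counters; int(c) = PySem.Int.ofChars? [c]
def pvLoopA : List Char → Int × Int → Int × Int
  | [], acc => acc
  | c :: cs, (h, l) =>
    match PySem.Int.ofChars? [c] with
    | none => pvLoopA cs (h, l)        -- except ValueError: pass
    | some d =>
      if 0 ≤ d ∧ d ≤ 4 then pvLoopA cs (h, l + 1)
      else if 5 ≤ d ∧ d ≤ 9 then pvLoopA cs (h + 1, l)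
      else pvLoopA cs (h, l)

def get_high_low_info (secret : String) : Int × Int :=
  pvLoopA secret.toList (0, 0)

-- ===== PORT B =====
-- pass 1: values = [int(c) for c in secret if it parses]; pass 2: low = count(d ≤ 4), high = len - low
def get_high_low_info_alt (secret : String) : Int × Int :=
  let values := secret.toList.filterMap (fun c => PySem.Int.ofChars? [c])
  let low_count : Int := (values.countP (fun d => decide (d ≤ 4)) : Nat)
  ((values.length : Int) - low_count, low_count)

-- ===== PRECONDITION & SPEC =====
def Spec_get_high_low_info (secret : String) (out : Int × Int) : Prop := out = get_high_low_info_alt secret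
instance (secret : String) (out : Int × Int) : Decidable (Spec_get_high_low_info secret out) := by unfold Spec_get_high_low_info; infer_instance

-- ===== CLAIM (what is proved, stated in full; the proofs are below) =====
def Claim_equal_get_high_low_info : Prop := ∀ (secret : String), Dom_get_high_low_info secret → Spec_get_high_low_info secret (get_high_low_info secret)

-- ===== LEMMAS AND PROOFS =====

-- every single printable-ASCII/whitespace character that int() parses has value 0..9
lemma pv_single_char_digit (c : Char) (hc : c.toNat < 127) (d : Int)
    (hd : PySem.Int.ofChars? [c] = some d) : 0 ≤ d ∧ d ≤ 9 := by
  have key : ∀ n, n < 127 →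
      (PySem.Int.ofChars? [Char.ofNat n]).all (fun d => decide (0 ≤ d ∧ d ≤ 9)) = true := by
    decide
  have h := key c.toNat hc
  rw [Char.ofNat_toNat, hd] at h
  simpa using h

-- the loop of A computes B's two-pass counts, shifted by the accumulator
lemma pvLoopA_eq (cs : List Char) (h l : Int)
    (H : ∀ c ∈ cs, ∀ d, PySem.Int.ofChars? [c] = some d → 0 ≤ d ∧ d ≤ 9) :
    pvLoopA cs (h, l) =
      (h + (((cs.filterMap (fun c => PySem.Int.ofChars? [c])).length : Int)
            - ((cs.filterMap (fun c => PySem.Int.ofChars? [c])).countP (fun d => decide (d ≤ 4)) : Nat)),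
       l + ((cs.filterMap (fun c => PySem.Int.ofChars? [c])).countP (fun d => decide (d ≤ 4)) : Nat)) := by
  induction cs generalizing h l with
  | nil => simp [pvLoopA]
  | cons c cs ih =>
    have Hc := H c (by simp)
    have Hrest : ∀ c' ∈ cs, ∀ d, PySem.Int.ofChars? [c'] = some d → 0 ≤ d ∧ d ≤ 9 :=
      fun c' hc' => H c' (by simp [hc'])
    cases hf : PySem.Int.ofChars? [c] with
    | none =>
      simp only [pvLoopA, hf, List.filterMap_cons, ih _ _ Hrest]
    | some d =>
      have hd09 := Hc d hf
      by_cases hle : d ≤ 4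
      · have hpos : (0 ≤ d ∧ d ≤ 4) := ⟨hd09.1, hle⟩
        simp only [pvLoopA, hf]
        rw [if_pos hpos, ih _ _ Hrest]
        simp only [List.filterMap_cons, hf, List.countP_cons, List.length_cons,
          hle, decide_true, if_true, Prod.mk.injEq]
        constructor <;> push_cast <;> ring
      · have h1 : ¬ (0 ≤ d ∧ d ≤ 4) := fun hx => hle hx.2
        have h2 : (5 ≤ d ∧ d ≤ 9) := ⟨by omega, hd09.2⟩
        simp only [pvLoopA, hf]
        rw [if_neg h1, if_pos h2, ih _ _ Hrest]
        simp only [List.filterMap_cons, hf, List.countP_cons, List.length_cons,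
          hle, decide_false, Prod.mk.injEq]
        constructor <;> push_cast <;> ring

-- ===== VERDICT (by name: the statement is the Claim_ definition above) =====
theorem get_high_low_info_spec : Claim_equal_get_high_low_info := by
  intro secret hdom
  unfold Spec_get_high_low_info get_high_low_info get_high_low_info_alt
  have Hall : ∀ c ∈ secret.toList, ∀ d, PySem.Int.ofChars? [c] = some d → 0 ≤ d ∧ d ≤ 9 := by
    intro c hc d hd
    have hmem : pvDomChar c = true := by
      have := hdom
      unfold Dom_get_high_low_info pvDomStr at this
      exact List.all_eq_true.mp this c hc
    have hlt : c.toNat < 127 := by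
      unfold pvDomChar at hmem
      simp only [Bool.or_eq_true, Bool.and_eq_true, decide_eq_true_eq, beq_iff_eq] at hmem
      omega
    exact pv_single_char_digit c hlt d hd
  rw [pvLoopA_eq secret.toList 0 0 Hall]
  simp
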